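-- pv_equiv track=rewrite | github.com/shreya-bluehen-2025/shrey-shrey | monster_mash.py | take_until_long
-- ===== SOURCE A (Python) =====
-- Media = {'name': str, 'kind': str, 'duration': int}
--
-- def take_until_long(media: Media) -> int:
--
--     '''
--     This function takes items until an item is above or at 100 minutes.
--
--     Args:
--     media (Media): A dictionary is taken for this function.
--
--     Returns:
--     int: THe number of medias, before a really long media.
--     '''
--
--     total = 0
--     taking = True
--     for med in media:
--         if med["duration"] >= 100:
--             taking = False
--         elif taking:
--             total = total + 1
--     return total
-- ===== SOURCE B (Python) =====
-- from itertools import takewhile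
--
-- def take_until_long(media):
--     return sum(1 for _ in takewhile(lambda m: m["duration"] < 100, media))
-- ===== Notes on version B (the rewrite author's own statement) =====
-- stated objective: idiomatic
-- what changed: Replaces the whole-list scan with a boolean 'taking' flag by counting the prefix consumed by itertools.takewhile, which stops at the first duration >= 100.
import Mathlib
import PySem

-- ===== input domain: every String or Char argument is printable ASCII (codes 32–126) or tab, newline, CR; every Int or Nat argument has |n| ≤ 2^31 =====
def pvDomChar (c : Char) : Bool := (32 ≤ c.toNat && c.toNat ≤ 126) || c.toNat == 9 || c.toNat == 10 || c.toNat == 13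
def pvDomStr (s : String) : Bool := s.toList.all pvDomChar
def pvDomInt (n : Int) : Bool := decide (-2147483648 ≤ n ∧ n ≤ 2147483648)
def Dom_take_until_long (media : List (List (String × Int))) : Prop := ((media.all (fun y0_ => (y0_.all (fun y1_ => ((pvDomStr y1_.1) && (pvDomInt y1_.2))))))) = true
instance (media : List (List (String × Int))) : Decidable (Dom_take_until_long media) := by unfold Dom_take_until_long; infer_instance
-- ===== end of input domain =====

-- ===== PORT A =====
-- B replaces A's whole-list scan with a boolean flag by counting the takewhile prefix (idiomatic decomposition).
-- med["duration"]: first-match lookup in the association list; Pre_ excludes missing keys (Python KeyError).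
def pvLookupDur (med : List (String × Int)) : Int :=
  ((med.lookup "duration").getD 0)

def take_until_long (media : List (List (String × Int))) : Int :=
  (media.foldl (fun (st : Int × Bool) med =>
      if pvLookupDur med ≥ 100 then (st.1, false)
      else if st.2 then (st.1 + 1, st.2) else st) (0, true)).1

-- ===== PORT B =====
def take_until_long_alt (media : List (List (String × Int))) : Int :=
  ((media.takeWhile (fun med => pvLookupDur med < 100)).length : Int)

-- ===== PRECONDITION & SPEC =====
-- Pre_ excludes inputs where some item lacks a "duration" key: Python A raises KeyError there.
def Pre_take_until_long (media : List (List (String × Int))) : Prop :=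
  (media.all (fun med => med.any (fun p => p.1 == "duration"))) = true
instance (media : List (List (String × Int))) : Decidable (Pre_take_until_long media) := by unfold Pre_take_until_long; infer_instance
def pvWitness_take_until_long : (List (List (String × Int))) := [[("duration", 5)], [("duration", 150)], [("duration", 1)]]
def Spec_take_until_long (media : List (List (String × Int))) (out : Int) : Prop := out = take_until_long_alt media
instance (media : List (List (String × Int))) (out : Int) : Decidable (Spec_take_until_long media out) := by unfold Spec_take_until_long; infer_instance

-- ===== CLAIM (what is proved, stated in full; the proofs are below) =====
def Claim_equal_take_until_long : Prop := ∀ (media : List (List (String × Int))), Dom_take_until_long media → Pre_take_until_long media → Spec_take_until_long media (take_until_long media)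

-- ===== LEMMAS AND PROOFS =====
theorem pv_fold_false (media : List (List (String × Int))) (t : Int) :
    (media.foldl (fun (st : Int × Bool) med =>
      if pvLookupDur med ≥ 100 then (st.1, false)
      else if st.2 then (st.1 + 1, st.2) else st) (t, false)).1 = t := by
  induction media generalizing t with
  | nil => rfl
  | cons m ms ih =>
    simp only [List.foldl_cons]
    split_ifs with h1 h2
    · exact ih t
    · simp at h2
    · exact ih t

theorem pv_fold_true (media : List (List (String × Int))) (t : Int) :
    (media.foldl (fun (st : Int × Bool) med =>
      if pvLookupDur med ≥ 100 then (st.1, false)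
      else if st.2 then (st.1 + 1, st.2) else st) (t, true)).1
    = t + ((media.takeWhile (fun med => pvLookupDur med < 100)).length : Int) := by
  induction media generalizing t with
  | nil => simp
  | cons m ms ih =>
    simp only [List.foldl_cons, List.takeWhile]
    by_cases h : pvLookupDur m ≥ 100
    · have : ¬ (pvLookupDur m < 100) := not_lt.mpr h
      simp [h, this, pv_fold_false]
    · have hlt : pvLookupDur m < 100 := lt_of_not_ge h
      simp only [if_neg h, if_true, hlt, decide_true]
      rw [ih (t + 1)]
      simp
      ring

-- ===== VERDICT (by name: the statement is the Claim_ definition above) =====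
theorem take_until_long_spec : Claim_equal_take_until_long := by
  intro media _ _
  unfold Spec_take_until_long take_until_long take_until_long_alt
  rw [pv_fold_true]
  simp
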